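-- pv_equiv track=rewrite | github.com/drewbrew/advent-of-code-2021 | day10.py | score_completion
-- ===== SOURCE A (Python) =====
-- def score_completion(completion_chars: str) -> int:
--     score = 0
--     points = {
--         ")": 1,
--         "]": 2,
--         "}": 3,
--         ">": 4,
--     }
--     for char in completion_chars:
--         score *= 5
--         score += points[char]
--     return score
-- ===== SOURCE B (Python) =====
-- def score_completion(completion_chars: str) -> int:
--     points = {
--         ")": 1,
--         "]": 2,
--         "}": 3,
--         ">": 4,
--     }
--     score = 0
--     multiplier = 1
--     for char in reversed(completion_chars):
--         score += points[char] * multiplier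
--         multiplier *= 5
--     return score
-- ===== Notes on version B (the rewrite author's own statement) =====
-- stated objective: alternative
-- what changed: Replaces left-to-right Horner accumulation (score*5+points[c]) with a right-to-left pass keeping an explicit place-value multiplier that grows by 5 each step.
import Mathlib
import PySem

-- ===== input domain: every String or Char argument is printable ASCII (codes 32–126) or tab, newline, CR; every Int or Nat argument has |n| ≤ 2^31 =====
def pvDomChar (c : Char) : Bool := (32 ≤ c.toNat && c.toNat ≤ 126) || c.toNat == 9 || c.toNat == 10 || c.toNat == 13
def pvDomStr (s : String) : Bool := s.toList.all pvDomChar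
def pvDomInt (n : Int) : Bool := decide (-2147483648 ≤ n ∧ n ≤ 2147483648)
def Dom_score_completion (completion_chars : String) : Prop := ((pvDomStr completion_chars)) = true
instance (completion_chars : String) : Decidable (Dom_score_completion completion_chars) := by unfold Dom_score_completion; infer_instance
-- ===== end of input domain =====

-- B replaces A's left-to-right Horner accumulation by a right-to-left pass with an
-- explicit place-value multiplier (objective: alternative decomposition, same cost).

-- the 'points' dict both programs use (lookup exact on Pre_, where every char is a key)
def pvPoints : PySem.Dict Char Int :=
  (PySem.Dict.empty.insert ')' 1 |>.insert ']' 2 |>.insert '}' 3 |>.insert '>' 4)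

-- ===== PORT A =====
-- for char in s: score *= 5; score += points[char]   (KeyError excluded by Pre_)
def score_completion (completion_chars : String) : Int :=
  completion_chars.toList.foldl (fun score char => score * 5 + pvPoints.getD char 0) 0

-- ===== PORT B =====
-- for char in reversed(s): score += points[char]*multiplier; multiplier *= 5
def score_completion_alt (completion_chars : String) : Int :=
  (completion_chars.toList.reverse.foldl
    (fun (sm : Int × Int) char => (sm.1 + pvPoints.getD char 0 * sm.2, sm.2 * 5)) (0, 1)).1

-- ===== PRECONDITION & SPEC =====
-- Pre_ excludes strings containing a character other than ) ] } > : on those the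
-- dict lookup points[char] raises KeyError in both A and B.
def Pre_score_completion (completion_chars : String) : Prop :=
  completion_chars.toList.all (fun c => c == ')' || c == ']' || c == '}' || c == '>') = true
instance (completion_chars : String) : Decidable (Pre_score_completion completion_chars) := by
  unfold Pre_score_completion; infer_instance

def pvWitness_score_completion : String := "]})>"

def Spec_score_completion (completion_chars : String) (out : Int) : Prop := out = score_completion_alt completion_chars
instance (completion_chars : String) (out : Int) : Decidable (Spec_score_completion completion_chars out) := by unfold Spec_score_completion; infer_instance

-- ===== CLAIM (what is proved, stated in full; the proofs are below) =====
def Claim_equal_score_completion : Prop := ∀ (completion_chars : String), Dom_score_completion completion_chars → Pre_score_completion completion_chars → Spec_score_completion completion_chars (score_completion completion_chars)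

-- ===== LEMMAS AND PROOFS =====

-- B's reversed pass with multiplier computes s + m * (Horner value of the un-reversed list)
theorem pv_rev_fold (l : List Char) (s m : Int) :
    (l.foldl (fun (sm : Int × Int) char => (sm.1 + pvPoints.getD char 0 * sm.2, sm.2 * 5)) (s, m)).1
      = s + m * (l.reverse.foldl (fun score char => score * 5 + pvPoints.getD char 0) 0) := by
  induction l generalizing s m with
  | nil => simp
  | cons c t ih =>
      simp only [List.foldl_cons, List.reverse_cons, List.foldl_append, List.foldl_cons,
        List.foldl_nil, ih]
      ring

-- ===== VERDICT (by name: the statement is the Claim_ definition above) =====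
theorem score_completion_spec : Claim_equal_score_completion := by
  intro s _ _
  unfold Spec_score_completion score_completion score_completion_alt
  rw [pv_rev_fold, List.reverse_reverse]
  ring
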